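-- pv_equiv track=rewrite | github.com/the-vampiire/hacktoberithms | beginner/sum-earnings_Kushagra-0801.py | sum_earnings
-- ===== SOURCE A (Python) =====
-- def sum_earnings(finance_data):
--     """Validate and process input."""
--     try:
--         required_nums = finance_data.count(',') + 1
--         history = list(map(int, finance_data.split(',')))
--         if len(history) != required_nums:
--             raise ValueError
--         balance = 0
--         for i in history:
--             balance += i
--             if balance < 0:
--                 balance = 0
--         return balance
--     except ValueError:
--         return 0
-- ===== SOURCE B (Python) =====
-- def sum_earnings(finance_data):
--     """Validate and process input."""
--     try:
--         nums = list(map(int, finance_data.split(',')))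
--     except ValueError:
--         return 0
--     total = 0
--     lowest = 0
--     for x in nums:
--         total += x
--         if total < lowest:
--             lowest = total
--     return total - lowest
-- ===== Notes on version B (the rewrite author's own statement) =====
-- stated objective: alternative
-- what changed: Replaces the floored running balance (reset to 0 whenever it goes negative) by one pass maintaining the plain prefix sum and the minimum prefix value seen (starting at 0), returning total - lowest, which equals the floored balance; the dead separator-count/length consistency check is dropped since split always yields one more piece than the number of separators.
import Mathlib
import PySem

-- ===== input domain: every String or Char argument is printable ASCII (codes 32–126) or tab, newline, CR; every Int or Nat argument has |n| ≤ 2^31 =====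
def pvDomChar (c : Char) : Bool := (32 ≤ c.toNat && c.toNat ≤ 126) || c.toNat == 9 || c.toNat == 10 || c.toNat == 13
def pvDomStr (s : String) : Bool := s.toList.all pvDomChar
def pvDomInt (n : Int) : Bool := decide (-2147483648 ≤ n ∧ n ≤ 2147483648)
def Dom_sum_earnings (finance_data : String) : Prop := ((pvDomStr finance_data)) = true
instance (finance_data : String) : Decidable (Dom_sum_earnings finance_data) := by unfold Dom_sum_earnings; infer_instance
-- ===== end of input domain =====

-- B replaces A's floored running balance by a prefix-sum / minimum-prefix pass (alternative, same cost).

-- ===== PORT A =====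
-- literal port: count(',')+1, parse all pieces with int() (ValueError -> 0), the dead
-- length check, then the floored running balance.
def sum_earnings (finance_data : String) : Int :=
  let required_nums : Int := (PySem.Str.count finance_data "," : Int) + 1
  match PySem.Str.split? finance_data "," with
  | none => 0  -- unreachable: sep "," is nonempty
  | some pieces =>
  match pieces.mapM PySem.Int.ofStr? with
  | none => 0
  | some history =>
    if (history.length : Int) ≠ required_nums then 0
    else history.foldl (fun balance i =>
      let balance := balance + i
      if balance < 0 then 0 else balance) 0

-- ===== PORT B =====
-- literal port of Source B: parse, then one pass keeping (total, lowest prefix), return total - lowest.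
def sum_earnings_alt (finance_data : String) : Int :=
  match PySem.Str.split? finance_data "," with
  | none => 0  -- unreachable: sep "," is nonempty
  | some pieces =>
  match pieces.mapM PySem.Int.ofStr? with
  | none => 0
  | some nums =>
    let tl := nums.foldl (fun (p : Int × Int) x =>
      let total := p.1 + x
      (total, if total < p.2 then total else p.2)) (0, 0)
    tl.1 - tl.2

-- ===== PRECONDITION & SPEC =====
def Spec_sum_earnings (finance_data : String) (out : Int) : Prop := out = sum_earnings_alt finance_data
instance (finance_data : String) (out : Int) : Decidable (Spec_sum_earnings finance_data out) := by unfold Spec_sum_earnings; infer_instance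

-- ===== CLAIM (what is proved, stated in full; the proofs are below) =====
def Claim_equal_sum_earnings : Prop := ∀ (finance_data : String), Dom_sum_earnings finance_data → Spec_sum_earnings finance_data (sum_earnings finance_data)

-- ===== LEMMAS AND PROOFS =====

-- length of splitOn.go vs count.go on the same input
theorem pv_splitOn_go_length (sub : List Char) (hsub : sub ≠ []) :
    ∀ (n : Nat) (l cur : List Char) (acc : List (List Char)), l.length ≤ n →
      (PySem.Chars.splitOn.go sub (n + 1) l cur acc).length
        = PySem.Chars.count.go sub n l acc.length + 1 := by
  intro n
  induction n with
  | zero =>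
    intro l cur acc hl
    have : l = [] := List.eq_nil_of_length_eq_zero (Nat.le_zero.mp hl)
    subst this
    simp [PySem.Chars.splitOn.go, PySem.Chars.count.go]
  | succ n ih =>
    intro l cur acc hl
    cases l with
    | nil => simp [PySem.Chars.splitOn.go, PySem.Chars.count.go]
    | cons c rest =>
      rw [PySem.Chars.splitOn.go, PySem.Chars.count.go]
      by_cases hp : sub.isPrefixOf (c :: rest) = true
      · simp only [hp, if_true]
        have hdrop : (List.drop sub.length (c :: rest)).length ≤ n := by
          have h1 : 1 ≤ sub.length := by
            cases sub with
            | nil => exact absurd rfl hsub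
            | cons a t => simp
          simp only [List.length_drop]
          omega
        have := ih (List.drop sub.length (c :: rest)) [] (cur.reverse :: acc) hdrop
        simpa using this
      · simp only [hp]
        exact ih rest (c :: cur) acc (by simpa using Nat.lt_succ_iff.mp (by simpa using hl))

-- the length check in A never fires: split always yields count+1 pieces
theorem pv_chars_splitOn_length (l : List Char) :
    (PySem.Chars.splitOn l [',']).length = PySem.Chars.count l [','] + 1 := by
  rw [PySem.Chars.splitOn, PySem.Chars.count]
  simp only [List.isEmpty_cons, Bool.false_eq_true, if_false]
  exact pv_splitOn_go_length [','] (by simp) l.length l [] [] le_rfl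

-- the core identity: the floored balance equals prefix sum minus minimum prefix
theorem pv_fold_eq (l : List Int) :
    ∀ (s m : Int), m ≤ s →
      l.foldl (fun balance i =>
        let balance := balance + i
        if balance < 0 then 0 else balance) (s - m)
      = (l.foldl (fun (p : Int × Int) x =>
          let total := p.1 + x
          (total, if total < p.2 then total else p.2)) (s, m)).1
        - (l.foldl (fun (p : Int × Int) x =>
          let total := p.1 + x
          (total, if total < p.2 then total else p.2)) (s, m)).2 := by
  induction l with
  | nil => intro s m _; simp
  | cons x t ih =>
    intro s m hm
    simp only [List.foldl_cons]
    by_cases hlt : s + x < m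
    · have h1 : s - m + x < 0 := by omega
      have h2 : (s + x : Int) < m := hlt
      simp only [h1, if_pos, h2]
      have := ih (s + x) (s + x) le_rfl
      simpa using this
    · have h1 : ¬ (s - m + x < 0) := by omega
      have h2 : ¬ ((s + x : Int) < m) := hlt
      simp only [h1, h2, if_neg, not_false_eq_true]
      have := ih (s + x) m (by omega)
      have harith : s - m + x = s + x - m := by ring
      rw [harith]
      simpa using this

-- mapM over Option preserves length
theorem pv_mapM_length {α β : Type} (f : α → Option β) :
    ∀ (l : List α) (l' : List β), l.mapM f = some l' → l'.length = l.length := by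
  intro l
  induction l with
  | nil => intro l' h; simp_all
  | cons a t ih =>
    intro l' h
    simp only [List.mapM_cons, Option.bind_eq_bind, Option.bind_eq_some_iff] at h
    obtain ⟨b, _, t', ht', hl'⟩ := h
    have hl'' : b :: t' = l' := by simpa using hl'
    subst hl''
    simp [ih t' ht']

-- ===== VERDICT (by name: the statement is the Claim_ definition above) =====
theorem sum_earnings_spec : Claim_equal_sum_earnings := by
  intro fd _
  unfold Spec_sum_earnings sum_earnings sum_earnings_alt
  have hsplit : PySem.Str.split? fd ","
      = some ((PySem.Chars.splitOn fd.toList [',']).map String.ofList) := by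
    simp [PySem.Str.split?, PySem.Chars.split?]
  rw [hsplit]
  simp only
  cases hm : ((PySem.Chars.splitOn fd.toList [',']).map String.ofList).mapM PySem.Int.ofStr? with
  | none => simp
  | some history =>
    simp only
    have hlen : (history.length : Int) = (PySem.Str.count fd "," : Int) + 1 := by
      have h1 := pv_mapM_length PySem.Int.ofStr? _ _ hm
      rw [h1, List.length_map, pv_chars_splitOn_length]
      rw [PySem.Str.count_eq]
      push_cast
      ring_nf
    rw [if_neg (by omega)]
    have := pv_fold_eq history 0 0 le_rfl
    simpa using this
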